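-- pv_equiv track=rewrite | github.com/neoncircuit/CodeWars | 8 Kyu Python/Training JS #18: Methods of String object--concat() split() and its good friend join().py | split_and_merge
-- ===== SOURCE A (Python) =====
-- def split_and_merge(string_, separator):
--     words = string_.split(" ")  # Split the input string into a list of words
--
--     merged_words = []  # Create an empty list to store modified words
--
--     for word in words:
--         merged_word = separator.join(word)  # Join characters of each word using the separator
--         merged_words.append(merged_word)  # Add the modified word to the list
--
--     merged_string = " ".join(merged_words)  # Join the modified words back into a single string using space as separator
--
--     return merged_string
-- ===== SOURCE B (Python) =====
-- def split_and_merge(string_, separator):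
--     out = []
--     prev = None
--     for ch in string_:
--         if ch != ' ' and prev is not None and prev != ' ':
--             out.append(separator)
--         out.append(ch)
--         prev = ch
--     return ''.join(out)
-- ===== Notes on version B (the rewrite author's own statement) =====
-- stated objective: alternative
-- what changed: Replaces split-into-words + per-word join + rejoin with a single left-to-right pass that remembers the previous character and inserts the separator only between two adjacent non-space characters.
import Mathlib
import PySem

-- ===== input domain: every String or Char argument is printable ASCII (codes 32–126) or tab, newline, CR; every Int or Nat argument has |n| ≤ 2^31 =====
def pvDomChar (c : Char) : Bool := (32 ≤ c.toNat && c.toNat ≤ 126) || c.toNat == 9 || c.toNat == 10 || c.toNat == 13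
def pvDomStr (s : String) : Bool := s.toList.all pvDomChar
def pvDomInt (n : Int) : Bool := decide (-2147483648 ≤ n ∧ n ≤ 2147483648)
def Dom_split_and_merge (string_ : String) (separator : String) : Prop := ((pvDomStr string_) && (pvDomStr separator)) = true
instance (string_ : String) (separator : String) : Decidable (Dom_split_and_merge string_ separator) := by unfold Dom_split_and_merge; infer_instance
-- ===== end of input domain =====

-- B replaces split-into-words + per-word join + rejoin by a single pass over the
-- characters that inserts the separator only between two adjacent non-space
-- characters (objective: alternative decomposition, same cost).


-- ===== PORT A =====
-- string_.split(" "): the separator " " is non-empty, so Python never raises;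
-- PySem.Chars.splitOn is exactly the sep ≠ "" form of str.split.
def split_and_merge (string_ : String) (separator : String) : String :=
  let words : List String := (PySem.Chars.splitOn string_.toList [' ']).map String.ofList
  let merged_words : List String :=
    words.foldl (fun acc word =>
      acc ++ [PySem.Str.join separator (word.toList.map (fun c => String.ofList [c]))]) []
  PySem.Str.join " " merged_words

-- ===== PORT B =====
def split_and_merge_alt (string_ : String) (separator : String) : String :=
  let r := string_.toList.foldl (fun st c =>
      if (decide (c ≠ ' ') && (match st.2 with | some p => decide (p ≠ ' ') | none => false)) = true
      then (st.1 ++ separator.toList ++ [c], some c)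
      else (st.1 ++ [c], some c)) (([] : List Char), (none : Option Char))
  String.ofList r.1

-- ===== PRECONDITION & SPEC =====
def Spec_split_and_merge (string_ : String) (separator : String) (out : String) : Prop := out = split_and_merge_alt string_ separator
instance (string_ : String) (separator : String) (out : String) : Decidable (Spec_split_and_merge string_ separator out) := by unfold Spec_split_and_merge; infer_instance

-- ===== CLAIM (what is proved, stated in full; the proofs are below) =====
def Claim_equal_split_and_merge : Prop := ∀ (string_ : String) (separator : String), Dom_split_and_merge string_ separator → Spec_split_and_merge string_ separator (split_and_merge string_ separator)

-- ===== LEMMAS AND PROOFS =====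

-- Reference recursion for B's loop: the Bool is "previous char exists and is non-space".
def pvF (sep : List Char) : Bool → List Char → List Char
  | _, [] => []
  | b, c :: r => (if c ≠ ' ' ∧ b = true then sep ++ [c] else [c]) ++ pvF sep (decide (c ≠ ' ')) r

-- per-word transform of A, at the char-list level
def pvG (sep : List Char) (w : List Char) : List Char :=
  PySem.Chars.join sep (w.map (fun c => [c]))

theorem pv_join_cons_append (sep a b : List Char) (t : List (List Char)) :
    PySem.Chars.join sep ((a ++ b) :: t) = a ++ PySem.Chars.join sep (b :: t) := by
  cases t with
  | nil => simp [PySem.Chars.join_singleton]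
  | cons q t => simp [PySem.Chars.join_cons_cons, List.append_assoc]

theorem pv_splitOn_go_eq (c : Char) :
    ∀ (fuel : Nat) (l cur : List Char) (acc : List (List Char)), l.length ≤ fuel →
    PySem.Chars.splitOn.go [c] fuel l cur acc =
      acc.reverse ++ (List.splitOnP (· == c) l).modifyHead (cur.reverse ++ ·) := by
  intro fuel
  induction fuel with
  | zero =>
    intro l cur acc h
    have hl : l = [] := List.eq_nil_of_length_eq_zero (Nat.le_zero.mp h)
    subst hl
    simp [PySem.Chars.splitOn.go, List.splitOnP_nil]
  | succ n ih =>
    intro l cur acc h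
    cases l with
    | nil => simp [PySem.Chars.splitOn.go, List.splitOnP_nil]
    | cons d rest =>
      simp only [PySem.Chars.splitOn.go]
      by_cases hd : d = c
      · subst hd
        have hpre : [d].isPrefixOf (d :: rest) = true := by
          simp [List.isPrefixOf]
        rw [if_pos hpre]
        rw [ih _ [] (cur.reverse :: acc) (by simpa using Nat.le_of_succ_le_succ h)]
        simp only [List.splitOnP_cons, beq_self_eq_true, if_pos]
        rcases hsp : List.splitOnP (fun x => x == d) rest with _ | ⟨w, ws⟩ <;>
          simp [hsp, List.modifyHead]
      · have hpre : [c].isPrefixOf (d :: rest) = false := by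
          simp only [List.isPrefixOf, Bool.and_true]
          exact beq_eq_false_iff_ne.mpr (fun hcd => hd hcd.symm)
        rw [if_neg (by simp [hpre])]
        rw [ih rest (d :: cur) acc (by simpa using Nat.le_of_succ_le_succ h)]
        rcases hsp : List.splitOnP (· == c) rest with _ | ⟨w, ws⟩
        · exact absurd hsp (List.splitOnP_ne_nil _ _)
        · simp [hsp, hd, List.modifyHead, List.append_assoc]

theorem pv_splitOn_eq (c : Char) (s : List Char) :
    PySem.Chars.splitOn s [c] = List.splitOnP (· == c) s := by
  rw [PySem.Chars.splitOn, pv_splitOn_go_eq c (s.length + 1) s [] [] (Nat.le_succ _)]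
  rcases hsp : List.splitOnP (· == c) s with _ | ⟨w, ws⟩
  · exact absurd hsp (List.splitOnP_ne_nil _ _)
  · simp [List.modifyHead]

-- inversion: a split whose first word is non-empty starts with that word's head
theorem pv_splitOnP_inv (p : Char → Bool) (r : List Char) (c' : Char) (w' : List Char)
    (ws : List (List Char)) (h : List.splitOnP p r = (c' :: w') :: ws) :
    ∃ r', r = c' :: r' ∧ p c' = false ∧ List.splitOnP p r' = w' :: ws := by
  cases r with
  | nil => simp [List.splitOnP_nil] at h
  | cons d r' =>
    rw [List.splitOnP_cons] at h
    by_cases hd : p d = true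
    · rw [if_pos hd] at h
      simp at h
    · rw [if_neg hd] at h
      rcases hsp : List.splitOnP p r' with _ | ⟨w, ws0⟩
      · exact absurd hsp (List.splitOnP_ne_nil _ _)
      · rw [hsp] at h
        simp [List.modifyHead] at h
        obtain ⟨⟨hdc, hww⟩, hws⟩ := h
        exact ⟨r', by rw [hdc], by rw [← hdc]; simpa using hd, by rw [hsp, hww, hws]⟩

-- pvF true differs from pvF false exactly by a leading separator when s starts non-space
theorem pvF_true_eq (sep : List Char) (s : List Char) :
    pvF sep true s = (if s ≠ [] ∧ s.head? ≠ some ' ' then sep else []) ++ pvF sep false s := by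
  cases s with
  | nil => simp [pvF]
  | cons c r =>
    by_cases hc : c = ' '
    · subst hc; simp [pvF]
    · simp [pvF, hc]

-- main A-side characterisation
theorem pv_main (sep : List Char) (s : List Char) :
    PySem.Chars.join [' '] ((List.splitOnP (· == ' ') s).map (pvG sep)) = pvF sep false s := by
  induction s with
  | nil => simp [List.splitOnP_nil, pvG, PySem.Chars.join_singleton, pvF]
  | cons c r ih =>
    by_cases hc : c = ' '
    · subst hc
      rw [List.splitOnP_cons, if_pos (by simp)]
      rcases hsp : List.splitOnP (· == ' ') r with _ | ⟨w, ws⟩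
      · exact absurd hsp (List.splitOnP_ne_nil _ _)
      · rw [hsp] at ih
        simp only [List.map_cons] at ih ⊢
        rw [PySem.Chars.join_cons_cons, ih]
        simp [pvG, PySem.Chars.join_nil, pvF]
    · rw [List.splitOnP_cons, if_neg (by simp [hc])]
      rcases hsp : List.splitOnP (· == ' ') r with _ | ⟨w, ws⟩
      · exact absurd hsp (List.splitOnP_ne_nil _ _)
      · rw [hsp] at ih
        simp only [List.modifyHead, List.map_cons]
        cases w with
        | nil =>
          -- first word of r empty: r = [] or r starts with ' '
          have hg : pvG sep [c] = [c] := by simp [pvG, PySem.Chars.join_singleton]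
          have hr : ¬ (r ≠ [] ∧ r.head? ≠ some ' ') := by
            cases r with
            | nil => simp
            | cons d r' =>
              rw [List.splitOnP_cons] at hsp
              by_cases hd : d = ' '
              · simp [hd]
              · rw [if_neg (by simp [hd])] at hsp
                rcases hsp2 : List.splitOnP (· == ' ') r' with _ | ⟨w0, ws0⟩
                · exact absurd hsp2 (List.splitOnP_ne_nil _ _)
                · rw [hsp2] at hsp; simp [List.modifyHead] at hsp
          have step : PySem.Chars.join [' '] ([c] :: ws.map (pvG sep)) =
              [c] ++ PySem.Chars.join [' '] ([] :: ws.map (pvG sep)) := by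
            simpa using pv_join_cons_append [' '] [c] [] (ws.map (pvG sep))
          rw [hg, step]
          have h0 : PySem.Chars.join [' '] ([] :: ws.map (pvG sep)) = pvF sep false r := by
            rw [← ih]; simp [pvG, PySem.Chars.join_nil]
          rw [h0]
          have hstep2 : pvF sep false (c :: r) = [c] ++ pvF sep true r := by
            simp [pvF, hc]
          rw [hstep2, pvF_true_eq, if_neg hr]
          simp
        | cons c' w' =>
          obtain ⟨r', hr, hpc, hsp'⟩ := pv_splitOnP_inv _ r c' w' ws hsp
          have hc' : c' ≠ ' ' := by simpa using hpc
          have hg : pvG sep (c :: c' :: w') = [c] ++ sep ++ pvG sep (c' :: w') := by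
            simp [pvG, PySem.Chars.join_cons_cons]
          rw [hg]
          have step : PySem.Chars.join [' '] (([c] ++ sep ++ pvG sep (c' :: w')) :: ws.map (pvG sep)) =
              [c] ++ sep ++ PySem.Chars.join [' '] (pvG sep (c' :: w') :: ws.map (pvG sep)) := by
            rw [List.append_assoc]
            rw [pv_join_cons_append [' '] [c] (sep ++ pvG sep (c' :: w')) (ws.map (pvG sep))]
            rw [pv_join_cons_append [' '] sep (pvG sep (c' :: w')) (ws.map (pvG sep))]
            simp [List.append_assoc]
          rw [step]
          simp only [List.map_cons] at ih
          rw [ih]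
          subst hr
          simp [pvF, hc, hc', List.append_assoc]

-- B's foldl against pvF
theorem pv_foldl_eq (sep : List Char) :
    ∀ (l : List Char) (acc : List Char) (prev : Option Char),
    (l.foldl (fun st c =>
        if (decide (c ≠ ' ') && (match st.2 with | some p => decide (p ≠ ' ') | none => false)) = true
        then (st.1 ++ sep ++ [c], some c)
        else (st.1 ++ [c], some c)) (acc, prev)).1
      = acc ++ pvF sep (match prev with | some p => decide (p ≠ ' ') | none => false) l := by
  intro l
  induction l with
  | nil => intro acc prev; simp [pvF]
  | cons c r ih =>
    intro acc prev
    simp only [List.foldl_cons]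
    cases prev with
    | none =>
      rw [if_neg (by simp)]
      rw [ih]
      simp [pvF, List.append_assoc]
    | some p =>
      by_cases hcond : (decide (c ≠ ' ') && decide (p ≠ ' ')) = true
      · have hc12 : c ≠ ' ' ∧ p ≠ ' ' := by simpa [Bool.and_eq_true] using hcond
        rw [if_pos hcond, ih]
        simp [pvF, hc12.1, hc12.2]
      · rw [if_neg hcond, ih]
        have hn : ¬ (c ≠ ' ' ∧ decide (p ≠ ' ') = true) := by
          simp only [decide_eq_true_eq]
          simpa [Bool.and_eq_true] using hcond
        simp only [pvF, if_neg hn]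
        simp [List.append_assoc]

-- flatMap of a singleton-producing function is a map
theorem pv_flatMap_singleton {α β : Type} (f : α → β) (ws : List α) :
    ws.flatMap (fun w => [f w]) = ws.map f := by
  induction ws with
  | nil => simp
  | cons w ws ih => simp [ih]

-- ===== VERDICT (by name: the statement is the Claim_ definition above) =====
theorem split_and_merge_spec : Claim_equal_split_and_merge := by
  intro string_ separator _
  unfold Spec_split_and_merge split_and_merge split_and_merge_alt
  simp only []
  rw [PySem.List.foldl_append_eq_flatMap (fun (word : String) => [PySem.Str.join separator (List.map (fun c => String.ofList [c]) word.toList)]) (List.map String.ofList (PySem.Chars.splitOn string_.toList [' '])) []]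
  rw [pv_flatMap_singleton]
  rw [pv_foldl_eq separator.toList string_.toList [] none]
  rw [pv_splitOn_eq]
  simp only [List.nil_append, List.map_map]
  have hmap : ∀ w ∈ List.splitOnP (· == ' ') string_.toList,
      ((fun word => PySem.Str.join separator (List.map (fun c => String.ofList [c]) word.toList)) ∘
        String.ofList) w = String.ofList (pvG separator.toList w) := by
    intro w _
    simp [Function.comp_def, PySem.Str.join, pvG, List.map_map, String.toList_ofList]
  rw [List.map_congr_left hmap]
  rw [PySem.Str.join]
  congr 1
  rw [show (" ".toList : List Char) = [' '] from rfl]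
  rw [← pv_main separator.toList string_.toList]
  congr 1
  simp [List.map_map, Function.comp_def]
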